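-- pv_equiv track=rewrite | github.com/delican001/neural_network | hamming.py | delete_control
-- ===== SOURCE A (Python) =====
-- def delete_control(msg):
--     bit_nums=[]
--     i=1
--     while i < len(msg):
--         bit_nums.append(i-1)
--         i=i*2
--     res=""
--     for i in range(len(msg)):
--         if i in bit_nums:
--             pass
--         else:
--             res=res+msg[i]
--     deleted=""
--     for i in range(bit_nums.__len__()):
--         deleted=deleted+msg[bit_nums[i]]
--     return res,deleted
-- ===== SOURCE B (Python) =====
-- def delete_control(msg):
--     data = ""
--     ctrl = ""
--     start = 0
--     p = 1
--     while p < len(msg):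
--         idx = p - 1
--         ctrl += msg[idx]
--         data += msg[start:idx]
--         start = idx + 1
--         p *= 2
--     data += msg[start:]
--     return data, ctrl
-- ===== Notes on version B (the rewrite author's own statement) =====
-- stated objective: faster
-- what changed: Replaces the control-index list plus a per-character membership scan with a single boundary-driven pass that copies whole data slices between consecutive control positions (powers of two minus one) while collecting control bits.
import Mathlib
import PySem

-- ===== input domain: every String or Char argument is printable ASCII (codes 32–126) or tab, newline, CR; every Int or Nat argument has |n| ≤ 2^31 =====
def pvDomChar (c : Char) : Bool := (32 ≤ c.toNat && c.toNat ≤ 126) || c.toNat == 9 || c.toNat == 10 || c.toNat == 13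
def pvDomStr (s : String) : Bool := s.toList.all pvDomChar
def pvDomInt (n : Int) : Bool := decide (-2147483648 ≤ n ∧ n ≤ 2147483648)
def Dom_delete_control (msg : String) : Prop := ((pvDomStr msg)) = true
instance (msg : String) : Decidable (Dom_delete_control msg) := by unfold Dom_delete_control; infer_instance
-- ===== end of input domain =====

-- B replaces A's control-index list + per-character membership scan by one boundary-driven
-- pass copying whole data slices between consecutive control positions; return values proved equal.

-- ===== PORT A =====
-- the 'while i < len(msg): bit_nums.append(i-1); i = i*2' loop; the conjunct 0 < p only
-- makes the recursion total (Python's i is always ≥ 1, so it never changes the guard)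
def bitNums (n p : Nat) : List Nat :=
  if h : 0 < p ∧ p < n then (p - 1) :: bitNums n (2 * p) else []
  termination_by n - p
  decreasing_by omega

def delete_control (msg : String) : String × String :=
  let cs := msg.toList
  let n := cs.length
  let bit_nums := bitNums n 1
  -- 'for i in range(len(msg))': indices 0..n-1 are always in range, so getD is exact here
  let res := (List.range n).foldl
    (fun r i => if i ∈ bit_nums then r else r ++ [cs.getD i ' ']) []
  -- 'for i in range(len(bit_nums)): deleted += msg[bit_nums[i]]'; both indexings in range, getD exact
  let deleted := (List.range bit_nums.length).foldl
    (fun r i => r ++ [cs.getD (bit_nums.getD i 0) ' ']) []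
  (String.ofList res, String.ofList deleted)

-- ===== PORT B =====
-- B's while loop; state (p, start, data, ctrl); msg[start:idx] with 0 ≤ start ≤ idx ≤ len is
-- exactly (drop start).take (idx - start); the conjunct 0 < p only makes the recursion total
def bLoop (cs : List Char) (p start : Nat) (data ctrl : List Char) : List Char × List Char :=
  if _h : 0 < p ∧ p < cs.length then
    let idx := p - 1
    bLoop cs (2 * p) (idx + 1)
      (data ++ (cs.drop start).take (idx - start))
      (ctrl ++ [cs.getD idx ' '])
  else (data ++ cs.drop start, ctrl)
  termination_by cs.length - p
  decreasing_by omega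

def delete_control_alt (msg : String) : String × String :=
  let cs := msg.toList
  let (data, ctrl) := bLoop cs 1 0 [] []
  (String.ofList data, String.ofList ctrl)

-- ===== PRECONDITION & SPEC =====
def Spec_delete_control (msg : String) (out : String × String) : Prop := out = delete_control_alt msg
instance (msg : String) (out : String × String) : Decidable (Spec_delete_control msg out) := by unfold Spec_delete_control; infer_instance

-- ===== CLAIM (what is proved, stated in full; the proofs are below) =====
def Claim_equal_delete_control : Prop := ∀ (msg : String), Dom_delete_control msg → Spec_delete_control msg (delete_control msg)

-- ===== LEMMAS AND PROOFS =====

theorem bitNums_ge (n p : Nat) : ∀ x ∈ bitNums n p, p - 1 ≤ x := by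
  induction p using bitNums.induct (n := n) with
  | case1 p h ih =>
      intro x hx
      rw [bitNums, dif_pos h, List.mem_cons] at hx
      rcases hx with rfl | hx
      · omega
      · have := ih x hx; omega
  | case2 p h =>
      intro x hx
      rw [bitNums, dif_neg h] at hx
      simp at hx

theorem foldl_if_filter {α β : Type} (P : α → Prop) [DecidablePred P] (f : α → β)
    (l : List α) (acc : List β) :
    l.foldl (fun r i => if P i then r else r ++ [f i]) acc
      = acc ++ (l.filter (fun i => decide ¬ P i)).map f := by
  induction l generalizing acc with
  | nil => simp
  | cons a t ih =>
      by_cases h : P a <;> simp [List.foldl_cons, ih, h]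

theorem foldl_snoc_map {α β : Type} (g : α → β) (l : List α) (acc : List β) :
    l.foldl (fun r i => r ++ [g i]) acc = acc ++ l.map g := by
  induction l generalizing acc with
  | nil => simp
  | cons a t ih => simp [List.foldl_cons, ih]

theorem map_range_getD {α β : Type} (d : α) (B : List α) (g : α → β) :
    (List.range B.length).map (fun i => g (B.getD i d)) = B.map g := by
  apply List.ext_getElem
  · simp
  · intro i h1 h2
    have hi : i < B.length := by simpa using h2
    simp [List.getElem?_eq_getElem hi]

theorem map_getD_range' (cs : List Char) (s k : Nat) (hk : s + k ≤ cs.length) :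
    (List.range' s k).map (fun i => cs.getD i ' ') = (cs.drop s).take k := by
  apply List.ext_getElem
  · simp; omega
  · intro i h1 h2
    have hi : i < k := by simpa using h1
    simp only [List.getElem_map, List.getElem_range', List.getElem_take, List.getElem_drop]
    rw [List.getD_eq_getElem cs ' ' (by omega)]
    norm_num

theorem bLoop_eq (cs : List Char) (p start : Nat) (data ctrl : List Char)
    (hp : 0 < p) (hs : start ≤ p - 1) :
    bLoop cs p start data ctrl =
      (data ++ ((List.range' start (cs.length - start)).filter
          (fun i => decide ¬ i ∈ bitNums cs.length p)).map (fun i => cs.getD i ' '),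
       ctrl ++ (bitNums cs.length p).map (fun i => cs.getD i ' ')) := by
  induction p, start, data, ctrl using bLoop.induct (cs := cs) with
  | case1 p start data ctrl h idx ih =>
      have hpn : p < cs.length := h.2
      have hidx : idx = p - 1 := rfl
      have hB : bitNums cs.length p = idx :: bitNums cs.length (2 * p) := by
        rw [bitNums, dif_pos ⟨hp, hpn⟩]
      rw [bLoop, dif_pos h]
      rw [ih (by omega) (by omega)]
      rw [hB]
      have hge : ∀ x ∈ bitNums cs.length (2 * p), p ≤ x := by
        intro x hx
        have := bitNums_ge cs.length (2 * p) x hx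
        omega
      refine Prod.ext ?_ (by simp)
      -- data component
      have hsplit : List.range' start (cs.length - start)
          = List.range' start (idx - start) ++ idx :: List.range' (idx + 1) (cs.length - (idx + 1)) := by
        have h1 : cs.length - start = (idx - start) + ((cs.length - (idx + 1)) + 1) := by omega
        rw [h1, ← List.range'_append (step := 1)]
        congr 1
        have h2 : start + 1 * (idx - start) = idx := by omega
        rw [h2, List.range'_succ]
      simp only [hsplit, List.filter_append, List.filter_cons, List.map_append]
      have hfirst : (List.range' start (idx - start)).filter
          (fun i => decide ¬ i ∈ (idx :: bitNums cs.length (2 * p))) = List.range' start (idx - start) := by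
        apply List.filter_eq_self.mpr
        intro a ha
        have halt : a < start + (idx - start) := (List.mem_range'_1.mp ha).2
        simp only [decide_eq_true_eq, List.mem_cons]
        push Not
        constructor
        · omega
        · intro hmem; have := hge a hmem; omega
      have hmid : (decide ¬ idx ∈ (idx :: bitNums cs.length (2 * p))) = false := by simp
      have hlast : (List.range' (idx + 1) (cs.length - (idx + 1))).filter
            (fun i => decide ¬ i ∈ (idx :: bitNums cs.length (2 * p)))
          = (List.range' (idx + 1) (cs.length - (idx + 1))).filter
            (fun i => decide ¬ i ∈ bitNums cs.length (2 * p)) := by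
        apply List.filter_congr
        intro a ha
        have h1 : idx + 1 ≤ a := (List.mem_range'_1.mp ha).1
        have h2 : ¬ a = idx := by omega
        simp [List.mem_cons, h2]
      rw [hfirst, hmid, hlast]
      rw [map_getD_range' cs start (idx - start) (by omega)]
      simp
  | case2 p start data ctrl h =>
      rw [bLoop, dif_neg h]
      rw [bitNums, dif_neg h]
      simp only [List.map_nil, List.append_nil]
      refine Prod.ext ?_ rfl
      simp only [List.not_mem_nil, not_false_eq_true, decide_true, List.filter_true]
      by_cases hsn : start ≤ cs.length
      · rw [map_getD_range' cs start (cs.length - start) (by omega)]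
        simp
      · have : cs.length - start = 0 := by omega
        rw [this]
        rw [List.drop_eq_nil_of_le (by omega)]
        simp

-- ===== VERDICT (by name: the statement is the Claim_ definition above) =====
theorem delete_control_spec : Claim_equal_delete_control := by
  intro msg _hdom
  unfold Spec_delete_control delete_control delete_control_alt
  simp only [bLoop_eq msg.toList 1 0 [] [] (by omega) (by omega)]
  rw [foldl_if_filter (fun i => i ∈ bitNums msg.toList.length 1) (fun i => msg.toList.getD i ' ')]
  rw [foldl_snoc_map (fun i => msg.toList.getD ((bitNums msg.toList.length 1).getD i 0) ' ')]
  rw [map_range_getD 0 (bitNums msg.toList.length 1) (fun i => msg.toList.getD i ' ')]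
  simp [List.range_eq_range']
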